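-- pv_equiv track=rewrite | github.com/pypi-data/pypi-mirror-400 | packages/fastagentic/fastagentic-1.0.0-py3-none-any.whl/fastagentic/policy/scopes.py | _check_scope
-- ===== SOURCE A (Python) =====
-- from dataclasses import dataclass, field
--
-- @dataclass
-- class Scope:
--     """A scope defines a permission boundary.
--
--     Scopes follow OAuth2/OIDC conventions (e.g., "tools:read", "endpoints:invoke").
--
--     Attributes:
--         name: Scope identifier (e.g., "tools:read")
--         description: Human-readable description
--         implies: Other scopes this scope implies (inheritance)
--     """
--
--     name: str
--     description: str = ""
--     implies: list[str] = field(default_factory=list)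
--
--     def matches(self, required: str) -> bool:
--         """Check if this scope satisfies the required scope.
--
--         Args:
--             required: The required scope string
--
--         Returns:
--             True if this scope grants the required access
--         """
--         # Exact match
--         if self.name == required:
--             return True
--
--         # Wildcard: "tools:*" matches "tools:read", "tools:invoke", etc.
--         if self.name.endswith(":*"):
--             prefix = self.name[:-1]  # "tools:"
--             if required.startswith(prefix):
--                 return True
--
--         # Global wildcard
--         return self.name == "*"
--
-- def _check_scope(
--
--     required: str,
--     user_scopes: set[str],
-- ) -> bool:
--     """Check if user scopes satisfy the required scope.
--
--     Args:
--         required: Required scope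
--         user_scopes: Set of user's scopes (already expanded)
--
--     Returns:
--         True if access is granted
--     """
--     # Check direct match
--     if required in user_scopes:
--         return True
--
--     # Check wildcard matches
--     for user_scope in user_scopes:
--         scope = Scope(name=user_scope)
--         if scope.matches(required):
--             return True
--
--     return False
-- ===== SOURCE B (Python) =====
-- def _check_scope(required, user_scopes):
--     """Build from `required` the finite set of patterns that would grant it
--     (the scope itself, the global wildcard, and one wildcard per colon prefix),
--     then test whether that candidate set intersects the user's scopes."""
--     candidates = {required, "*"}
--     for i, ch in enumerate(required):
--         if ch == ":":
--             candidates.add(required[: i + 1] + "*")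
--     return not candidates.isdisjoint(user_scopes)
-- ===== Notes on version B (the rewrite author's own statement) =====
-- stated objective: faster
-- what changed: Instead of scanning every user scope and running Scope.matches on each, B derives from `required` alone the finite candidate set of granting patterns (required, '*', and one ':'-prefix wildcard per colon) and tests set intersection with user_scopes.
import Mathlib
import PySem

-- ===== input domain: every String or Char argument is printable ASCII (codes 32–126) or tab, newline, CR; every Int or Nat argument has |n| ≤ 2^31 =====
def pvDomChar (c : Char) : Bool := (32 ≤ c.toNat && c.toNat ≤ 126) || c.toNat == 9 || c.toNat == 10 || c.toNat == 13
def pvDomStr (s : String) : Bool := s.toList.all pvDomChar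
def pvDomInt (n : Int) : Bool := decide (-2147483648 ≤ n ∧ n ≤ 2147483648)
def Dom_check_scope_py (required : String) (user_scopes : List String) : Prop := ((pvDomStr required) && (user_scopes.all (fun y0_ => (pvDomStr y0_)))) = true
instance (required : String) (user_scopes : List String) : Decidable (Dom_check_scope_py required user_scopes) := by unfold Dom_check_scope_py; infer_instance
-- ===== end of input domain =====

-- B replaces A's per-user-scope Scope.matches loop by a candidate-pattern set derived from
-- `required` alone, intersected with user_scopes (objective: faster).


-- ===== PORT A =====
-- Scope.matches(self, required) with self.name = name
def pvScopeMatches (name : String) (required : String) : Bool :=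
  if name == required then true
  else if PySem.Str.endswith name ":*" then
    -- prefix = self.name[:-1]
    if PySem.Str.startswith required (PySem.Str.slice name none (some (-1))) then true
    else name == "*"
  else name == "*"

def check_scope_py (required : String) (user_scopes : List String) : Bool :=
  if user_scopes.contains required then true
  else user_scopes.any (fun user_scope => pvScopeMatches user_scope required)

-- ===== PORT B =====
-- candidates = {required, "*"}; for i, ch in enumerate(required): if ch == ':': candidates.add(required[:i+1] + "*")
def pvCandidates (required : String) : PySem.Set String :=
  (PySem.List.enumerate required.toList 0).foldl
    (fun acc p => if p.2 == ':' then PySem.Set.add acc (PySem.Str.slice required none (some (p.1 + 1)) ++ "*") else acc)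
    (PySem.Set.ofList [required, "*"])

-- return not candidates.isdisjoint(user_scopes)
def check_scope_py_alt (required : String) (user_scopes : List String) : Bool :=
  !(PySem.Set.isdisjoint (pvCandidates required) user_scopes)

-- ===== PRECONDITION & SPEC =====
def Spec_check_scope_py (required : String) (user_scopes : List String) (out : Bool) : Prop := out = check_scope_py_alt required user_scopes
instance (required : String) (user_scopes : List String) (out : Bool) : Decidable (Spec_check_scope_py required user_scopes out) := by unfold Spec_check_scope_py; infer_instance

-- ===== CLAIM (what is proved, stated in full; the proofs are below) =====
def Claim_equal_check_scope_py : Prop := ∀ (required : String) (user_scopes : List String), Dom_check_scope_py required user_scopes → Spec_check_scope_py required user_scopes (check_scope_py required user_scopes)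

-- ===== LEMMAS AND PROOFS =====

-- Characterisation of A's Scope.matches
theorem pvScopeMatches_iff (s required : String) :
    pvScopeMatches s required = true ↔
      s = required ∨ s = "*" ∨
        (PySem.Str.endswith s ":*" = true ∧
         PySem.Str.startswith required (PySem.Str.slice s none (some (-1))) = true) := by
  unfold pvScopeMatches
  split_ifs with h1 h2 h3 <;> simp_all

-- Membership in B's foldl-built candidate set, over an arbitrary pair list
theorem mem_cand_foldl (required : String) (l : List (Int × Char)) (init : PySem.Set String) (x : String) :
    x ∈ l.foldl (fun acc p => if p.2 == ':' then PySem.Set.add acc (PySem.Str.slice required none (some (p.1 + 1)) ++ "*") else acc) init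
      ↔ x ∈ init ∨ ∃ p ∈ l, p.2 = ':' ∧ x = PySem.Str.slice required none (some (p.1 + 1)) ++ "*" := by
  induction l generalizing init with
  | nil => simp
  | cons p l ih =>
    by_cases h : p.2 = ':'
    · rw [List.foldl_cons, if_pos (by simpa using h), ih]
      simp only [PySem.Set.mem_add, List.mem_cons]
      constructor
      · rintro ((hx | rfl) | ⟨q, hq, hq2, rfl⟩)
        · exact Or.inl hx
        · exact Or.inr ⟨p, Or.inl rfl, h, rfl⟩
        · exact Or.inr ⟨q, Or.inr hq, hq2, rfl⟩
      · rintro (hx | ⟨q, (rfl | hq), hq2, rfl⟩)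
        · exact Or.inl (Or.inl hx)
        · exact Or.inl (Or.inr rfl)
        · exact Or.inr ⟨q, hq, hq2, rfl⟩
    · rw [List.foldl_cons, if_neg (by simpa using h), ih]
      simp only [List.mem_cons]
      constructor
      · rintro (hx | ⟨q, hq, hq2, rfl⟩)
        · exact Or.inl hx
        · exact Or.inr ⟨q, Or.inr hq, hq2, rfl⟩
      · rintro (hx | ⟨q, (rfl | hq), hq2, rfl⟩)
        · exact Or.inl hx
        · exact absurd hq2 h
        · exact Or.inr ⟨q, hq, hq2, rfl⟩

-- Membership in enumerate
theorem mem_enumerate (cs : List Char) (s : Int) (p : Int × Char) :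
    p ∈ PySem.List.enumerate cs s ↔ ∃ k : Nat, cs[k]? = some p.2 ∧ p.1 = s + k := by
  induction cs generalizing s p with
  | nil => simp [PySem.List.enumerate_nil]
  | cons c cs ih =>
    simp only [PySem.List.enumerate_cons, List.mem_cons, ih]
    constructor
    · rintro (rfl | ⟨k, hk, h1⟩)
      · exact ⟨0, by simp, by simp⟩
      · exact ⟨k + 1, by simpa using hk, by push_cast at h1 ⊢; omega⟩
    · rintro ⟨k, hk, h1⟩
      cases k with
      | zero =>
        left
        obtain ⟨a, b⟩ := p
        simp_all
      | succ k =>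
        right
        exact ⟨k, by simpa using hk, by push_cast at h1 ⊢; omega⟩

-- A's wildcard branch at char level ↔ B's ':'-prefix candidate shape
theorem wild_iff (t r : List Char) :
    (∃ k : Nat, r[k]? = some ':' ∧ t = r.take (k + 1) ++ ['*']) ↔
      ([':', '*'] <:+ t ∧ t.dropLast <+: r) := by
  constructor
  · rintro ⟨k, hk, rfl⟩
    have htake : r.take (k + 1) = r.take k ++ [':'] := by
      rw [List.take_add_one, hk]; rfl
    constructor
    · rw [htake]
      exact ⟨r.take k, by simp⟩
    · rw [List.dropLast_concat]
      exact List.take_prefix _ _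
  · rintro ⟨⟨u, rfl⟩, hpre⟩
    have hdl : (u ++ [':', '*']).dropLast = u ++ [':'] := by
      have h2 : u ++ [':', '*'] = (u ++ [':']) ++ ['*'] := by simp
      rw [h2, List.dropLast_concat]
    rw [hdl] at hpre
    obtain ⟨v, hv⟩ := hpre
    refine ⟨u.length, ?_, ?_⟩
    · rw [← hv]
      simp
    · have htake : r.take (u.length + 1) = u ++ [':'] := by
        rw [← hv, List.take_append_of_le_length (by simp)]
        simp
      rw [htake]
      simp

-- Membership in B's candidate set equals A's Scope.matches predicate
theorem mem_candidates_iff (required s : String) :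
    s ∈ pvCandidates required ↔ pvScopeMatches s required = true := by
  rw [pvScopeMatches_iff]
  unfold pvCandidates
  rw [mem_cand_foldl]
  simp only [PySem.Set.mem_ofList, List.mem_cons, List.not_mem_nil, or_false]
  constructor
  · rintro ((rfl | rfl) | ⟨p, hp, hc, rfl⟩)
    · exact Or.inl rfl
    · exact Or.inr (Or.inl rfl)
    · right; right
      rw [mem_enumerate] at hp
      obtain ⟨k, hk, h1⟩ := hp
      rw [hc] at hk
      have hi : p.1 + 1 = ((k + 1 : Nat) : Int) := by push_cast; omega
      have h3 : (PySem.Str.slice required none (some (p.1 + 1)) ++ "*").toList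
          = required.toList.take (k + 1) ++ ['*'] := by
        rw [hi, String.toList_append]
        simp only [PySem.Str.slice, String.toList_ofList, PySem.Chars.slice_eq_listSlice]
        rw [PySem.List.slice_to _ (by omega)]
        simp
      have hw := (wild_iff (required.toList.take (k + 1) ++ ['*']) required.toList).mp
        ⟨k, hk, rfl⟩
      rw [PySem.Str.endswith_eq, PySem.Str.startswith_eq, PySem.Chars.endswith_iff,
          PySem.Chars.startswith_iff]
      have hw2 := hw.2
      rw [List.dropLast_concat] at hw2
      refine ⟨by rw [h3]; exact hw.1, ?_⟩
      have h4 : (PySem.Str.slice (PySem.Str.slice required none (some (p.1 + 1)) ++ "*")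
          none (some (-1))).toList = required.toList.take (k + 1) := by
        rw [PySem.Str.slice_to_neg_one, h3, List.dropLast_concat]
      rw [h4]
      exact hw2
  · rintro (rfl | rfl | ⟨he, hs⟩)
    · exact Or.inl (Or.inl rfl)
    · exact Or.inl (Or.inr rfl)
    · right
      rw [PySem.Str.endswith_eq, PySem.Chars.endswith_iff] at he
      rw [PySem.Str.startswith_eq, PySem.Chars.startswith_iff,
          PySem.Str.slice_to_neg_one] at hs
      obtain ⟨k, hk, ht⟩ := (wild_iff s.toList required.toList).mpr ⟨he, hs⟩
      refine ⟨((k : Int), ':'), ?_, rfl, ?_⟩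
      · rw [mem_enumerate]
        exact ⟨k, by simpa using hk, by omega⟩
      · apply String.toList_inj.mp
        rw [ht, String.toList_append]
        simp only [PySem.Str.slice, String.toList_ofList, PySem.Chars.slice_eq_listSlice]
        rw [PySem.List.slice_to _ (by omega)]
        simp

-- A collapses to a single `any` over user_scopes
theorem check_scope_py_eq_any (required : String) (us : List String) :
    check_scope_py required us = us.any (fun s => pvScopeMatches s required) := by
  unfold check_scope_py
  cases hc : us.contains required with
  | false => simp
  | true =>
    simp only [if_true]
    symm
    rw [List.any_eq_true]
    exact ⟨required, by simpa [List.contains_eq_mem] using hc, by simp [pvScopeMatches]⟩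

-- ===== VERDICT (by name: the statement is the Claim_ definition above) =====
theorem check_scope_py_spec : Claim_equal_check_scope_py := by
  unfold Claim_equal_check_scope_py
  intro required us _
  unfold Spec_check_scope_py check_scope_py_alt
  rw [check_scope_py_eq_any]
  unfold PySem.Set.isdisjoint
  rw [Bool.not_not, Bool.eq_iff_iff, List.any_eq_true, List.any_eq_true]
  constructor
  · rintro ⟨s, hs, hm⟩
    exact ⟨s, (mem_candidates_iff required s).mpr hm,
      by simp [PySem.Set.contains, List.contains_eq_mem, hs]⟩
  · rintro ⟨c, hc, hin⟩
    refine ⟨c, ?_, (mem_candidates_iff required c).mp hc⟩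
    simpa [PySem.Set.contains, List.contains_eq_mem] using hin
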